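-- pv_equiv track=rewrite | github.com/OwenPawl/ghidra-re-skill | ghidra_re_skill/modules/xpc_surface.py | _method_hints
-- ===== SOURCE A (Python) =====
-- from typing import Any
--
-- def _method_hints(symbols: list[dict[str, Any]], selectors: list[str]) -> dict[str, list[dict[str, Any]]]:
--     names = [{"name": selector, "source": "selector"} for selector in selectors]
--     names.extend({"name": str(symbol.get("name")), "source": str(symbol.get("source"))} for symbol in symbols)
--     listener = []
--     connection = []
--     interface = []
--     for item in names:
--         name = item["name"]
--         lowered = name.lower()
--         entry = {"name": name, "source": item["source"]}
--         if "listener" in lowered or "shouldacceptnewconnection" in lowered: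
--             listener.append(entry)
--         if "xpcconnection" in lowered or "machservicename" in lowered or "servicename" in lowered:
--             connection.append(entry)
--         if "interfacewithprotocol" in lowered or "xpcinterface" in lowered or "exportedinterface" in lowered:
--             interface.append(entry)
--     return {
--         "listener_methods": _dedupe_dicts(listener, ("name", "source"))[:500],
--         "connection_methods": _dedupe_dicts(connection, ("name", "source"))[:500],
--         "interface_methods": _dedupe_dicts(interface, ("name", "source"))[:500],
--     }
--
-- def _dedupe_dicts(items: list[dict[str, Any]], keys: tuple[str, ...]) -> list[dict[str, Any]]:
--     seen = set()
--     result = []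
--     for item in items:
--         marker = tuple(str(item.get(key)) for key in keys)
--         if marker in seen:
--             continue
--         seen.add(marker)
--         result.append(item)
--     return result
-- ===== SOURCE B (Python) =====
-- def _method_hints(symbols, selectors):
--     names = [(selector, "selector") for selector in selectors]
--     names += [(str(symbol.get("name")), str(symbol.get("source"))) for symbol in symbols]
--     table = (
--         ("listener_methods", ("listener", "shouldacceptnewconnection")),
--         ("connection_methods", ("xpcconnection", "machservicename", "servicename")),
--         ("interface_methods", ("interfacewithprotocol", "xpcinterface", "exportedinterface")),
--     )
--     result = {}
--     for key, keywords in table: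
--         seen = set()
--         bucket = []
--         for name, source in names:
--             lowered = name.lower()
--             if any(kw in lowered for kw in keywords) and (name, source) not in seen:
--                 seen.add((name, source))
--                 bucket.append({"name": name, "source": source})
--         result[key] = bucket[:500]
--     return result
-- ===== Notes on version B (the rewrite author's own statement) =====
-- stated objective: alternative
-- what changed: Replaces A's single pass with three conditional appends plus a separate dedupe helper by a keyword-table-driven per-bucket scan that filters and dedupes in one fused loop per bucket, over a list of (name, source) tuples instead of intermediate dicts.
import Mathlib
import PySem

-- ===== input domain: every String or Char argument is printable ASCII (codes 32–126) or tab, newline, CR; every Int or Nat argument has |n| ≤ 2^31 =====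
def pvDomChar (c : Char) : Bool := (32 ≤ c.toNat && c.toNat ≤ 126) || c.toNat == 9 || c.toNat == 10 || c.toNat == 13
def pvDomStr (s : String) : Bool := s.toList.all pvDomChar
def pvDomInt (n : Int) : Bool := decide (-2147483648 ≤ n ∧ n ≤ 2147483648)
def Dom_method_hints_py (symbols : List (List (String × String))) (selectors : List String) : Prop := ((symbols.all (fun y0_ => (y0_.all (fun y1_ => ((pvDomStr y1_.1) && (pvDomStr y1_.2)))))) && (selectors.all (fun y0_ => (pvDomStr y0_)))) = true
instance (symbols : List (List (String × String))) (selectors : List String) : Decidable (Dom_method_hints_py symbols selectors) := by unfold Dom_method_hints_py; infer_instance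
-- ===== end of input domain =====

-- B replaces A's single three-branch pass + separate dedupe helper by a keyword-table-driven
-- fused filter-and-dedupe scan per bucket (objective: alternative decomposition, same cost).

-- ===== PORT A =====

-- str(opt) for an Optional[str]: str(None) = "None", str on a str is the identity
def pyStrOpt : Option String → String
  | some v => v
  | none => "None"

-- symbol.get(k) followed by str(...)
def symGet (sym : List (String × String)) (k : String) : String :=
  pyStrOpt ((PySem.Dict.mk sym).get? k)

-- item[k] on an entry dict; every entry built below carries the key, so the default "" is unreachable (exact)
def itemGet (item : List (String × String)) (k : String) : String :=
  ((PySem.Dict.mk item).get? k).getD ""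

-- names = selector comprehension ++ symbol generator (entries as two-key dicts, as in A)
def namesA (symbols : List (List (String × String))) (selectors : List String) :
    List (List (String × String)) :=
  (selectors.map (fun s => [("name", s), ("source", "selector")])) ++
  (symbols.map (fun sym => [("name", symGet sym "name"), ("source", symGet sym "source")]))

-- the for-loop over names with its three conditional appends
def loopA : List (List (String × String)) →
    List (List (String × String)) × List (List (String × String)) × List (List (String × String)) →
    List (List (String × String)) × List (List (String × String)) × List (List (String × String))
  | [], acc => acc
  | item :: rest, (listener, connection, interface) =>
    let name := itemGet item "name"
    let lowered := PySem.Str.lower name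
    let entry := [("name", name), ("source", itemGet item "source")]
    loopA rest
      ((if PySem.Str.isIn "listener" lowered || PySem.Str.isIn "shouldacceptnewconnection" lowered
          then listener ++ [entry] else listener),
       (if PySem.Str.isIn "xpcconnection" lowered || PySem.Str.isIn "machservicename" lowered ||
            PySem.Str.isIn "servicename" lowered
          then connection ++ [entry] else connection),
       (if PySem.Str.isIn "interfacewithprotocol" lowered || PySem.Str.isIn "xpcinterface" lowered ||
            PySem.Str.isIn "exportedinterface" lowered
          then interface ++ [entry] else interface))

-- _dedupe_dicts with keys = ("name", "source"); marker = tuple(str(item.get(key)))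
def dedupeDicts : List (List (String × String)) → PySem.Set (String × String) →
    List (List (String × String))
  | [], _ => []
  | item :: rest, seen =>
    let marker := (pyStrOpt ((PySem.Dict.mk item).get? "name"),
                   pyStrOpt ((PySem.Dict.mk item).get? "source"))
    if PySem.Set.contains seen marker then dedupeDicts rest seen
    else item :: dedupeDicts rest (PySem.Set.add seen marker)

def method_hints_py (symbols : List (List (String × String))) (selectors : List String) :
    List (String × List (List (String × String))) :=
  let names := namesA symbols selectors
  let (listener, connection, interface) := loopA names ([], [], [])
  [("listener_methods", (dedupeDicts listener PySem.Set.empty).take 500),   -- [:500] = take 500 (exact)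
   ("connection_methods", (dedupeDicts connection PySem.Set.empty).take 500),
   ("interface_methods", (dedupeDicts interface PySem.Set.empty).take 500)]

-- ===== PORT B =====

-- names as (name, source) tuples: selectors first, then the symbols
def namesB (symbols : List (List (String × String))) (selectors : List String) :
    List (String × String) :=
  (selectors.map (fun s => (s, "selector"))) ++
  (symbols.map (fun sym => (symGet sym "name", symGet sym "source")))

def kwTable : List (String × List String) :=
  [("listener_methods", ["listener", "shouldacceptnewconnection"]),
   ("connection_methods", ["xpcconnection", "machservicename", "servicename"]),
   ("interface_methods", ["interfacewithprotocol", "xpcinterface", "exportedinterface"])]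

-- the fused per-bucket loop: filter by keyword match and dedupe on (name, source) in one pass
def fusedBucket (keywords : List String) : List (String × String) → PySem.Set (String × String) →
    List (List (String × String))
  | [], _ => []
  | (name, source) :: rest, seen =>
    let lowered := PySem.Str.lower name
    if (keywords.any (fun kw => PySem.Str.isIn kw lowered)) &&
        !(PySem.Set.contains seen (name, source)) then
      [("name", name), ("source", source)] :: fusedBucket keywords rest (PySem.Set.add seen (name, source))
    else fusedBucket keywords rest seen

def method_hints_py_alt (symbols : List (List (String × String))) (selectors : List String) :
    List (String × List (List (String × String))) :=
  let names := namesB symbols selectors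
  kwTable.map (fun kv => (kv.1, (fusedBucket kv.2 names PySem.Set.empty).take 500))

-- ===== PRECONDITION & SPEC =====
def Spec_method_hints_py (symbols : List (List (String × String))) (selectors : List String) (out : List (String × List (List (String × String)))) : Prop := out = method_hints_py_alt symbols selectors
instance (symbols : List (List (String × String))) (selectors : List String) (out : List (String × List (List (String × String)))) : Decidable (Spec_method_hints_py symbols selectors out) := by unfold Spec_method_hints_py; infer_instance

-- ===== CLAIM (what is proved, stated in full; the proofs are below) =====
def Claim_equal_method_hints_py : Prop := ∀ (symbols : List (List (String × String))) (selectors : List String), Dom_method_hints_py symbols selectors → Spec_method_hints_py symbols selectors (method_hints_py symbols selectors)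

-- ===== LEMMAS AND PROOFS =====

-- the entry dict built for the pair (n, s)
def mkE (p : String × String) : List (String × String) := [("name", p.1), ("source", p.2)]

theorem itemGet_mkE_name (p : String × String) : itemGet (mkE p) "name" = p.1 := rfl
theorem itemGet_mkE_source (p : String × String) : itemGet (mkE p) "source" = p.2 := rfl

theorem namesA_eq_map (symbols : List (List (String × String))) (selectors : List String) :
    namesA symbols selectors = (namesB symbols selectors).map mkE := by
  simp [namesA, namesB, Function.comp_def, mkE]

-- A's loop accumulates exactly the filtered entries, in order
theorem loopA_eq (names : List (String × String)) (l c i : List (List (String × String))) :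
    loopA (names.map mkE) (l, c, i) =
      (l ++ (names.filter (fun p =>
          PySem.Str.isIn "listener" (PySem.Str.lower p.1) ||
          PySem.Str.isIn "shouldacceptnewconnection" (PySem.Str.lower p.1))).map mkE,
       c ++ (names.filter (fun p =>
          PySem.Str.isIn "xpcconnection" (PySem.Str.lower p.1) ||
          PySem.Str.isIn "machservicename" (PySem.Str.lower p.1) ||
          PySem.Str.isIn "servicename" (PySem.Str.lower p.1))).map mkE,
       i ++ (names.filter (fun p =>
          PySem.Str.isIn "interfacewithprotocol" (PySem.Str.lower p.1) ||
          PySem.Str.isIn "xpcinterface" (PySem.Str.lower p.1) ||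
          PySem.Str.isIn "exportedinterface" (PySem.Str.lower p.1))).map mkE) := by
  induction names generalizing l c i with
  | nil => simp [loopA]
  | cons hd tl ih =>
    simp only [List.map_cons, loopA, itemGet_mkE_name, itemGet_mkE_source]
    rw [ih]
    obtain ⟨n, s⟩ := hd
    simp only [List.filter_cons]
    split_ifs <;> simp_all [mkE]

-- dedupe over mapped entries is B's fused loop on the filtered pair list
theorem dedupe_filter_eq_fused (keywords : List String) (names : List (String × String))
    (seen : PySem.Set (String × String)) :
    dedupeDicts ((names.filter (fun p =>
        keywords.any (fun kw => PySem.Str.isIn kw (PySem.Str.lower p.1)))).map mkE) seen =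
      fusedBucket keywords names seen := by
  induction names generalizing seen with
  | nil => simp [dedupeDicts, fusedBucket]
  | cons hd tl ih =>
    obtain ⟨n, s⟩ := hd
    rw [List.filter_cons]
    by_cases hc : (keywords.any (fun kw => PySem.Str.isIn kw (PySem.Str.lower n))) = true
    · rw [if_pos (by simpa using hc), List.map_cons]
      simp only [dedupeDicts, fusedBucket, mkE, pyStrOpt, PySem.Dict.get?_mk_cons, hc,
        Bool.true_and,
        show (("name" : String) == "name") = true from rfl,
        show (("source" : String) == "name") = false from rfl,
        show (("name" : String) == "source") = false from rfl,
        show (("source" : String) == "source") = true from rfl,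
        Bool.false_eq_true, ite_true, ite_false]
      by_cases hcont : PySem.Set.contains seen (n, s) = true
      · rw [if_pos hcont, if_neg (by rw [hcont]; simp)]
        exact ih seen
      · have hf : PySem.Set.contains seen (n, s) = false := by simpa using hcont
        rw [if_neg hcont, if_pos (by rw [hf]; rfl), ih]
    · have hc' : (keywords.any fun kw => PySem.Str.isIn kw (PySem.Str.lower n)) = false :=
        Bool.not_eq_true _ ▸ eq_false_of_ne_true hc
      rw [if_neg hc, ih]
      simp only [fusedBucket, hc', Bool.false_and, Bool.false_eq_true, if_false]

theorem method_hints_py_eq (symbols : List (List (String × String))) (selectors : List String) :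
    method_hints_py symbols selectors = method_hints_py_alt symbols selectors := by
  simp only [method_hints_py, method_hints_py_alt, namesA_eq_map, loopA_eq, List.nil_append]
  simp only [kwTable, List.map_cons, List.map_nil]
  refine congrArg₂ _ ?_ (congrArg₂ _ ?_ (congrArg₂ _ ?_ rfl)) <;>
    refine congrArg _ (congrArg _ ?_) <;>
    rw [← dedupe_filter_eq_fused] <;>
    simp [List.any_cons, Bool.or_assoc]

-- ===== VERDICT (by name: the statement is the Claim_ definition above) =====
theorem method_hints_py_spec : Claim_equal_method_hints_py := by
  intro symbols selectors _
  unfold Spec_method_hints_py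
  exact method_hints_py_eq symbols selectors
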